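-- pv_equiv track=rewrite | github.com/hawshemi/CS50X | credit.py | valid_card
-- ===== SOURCE A (Python) =====
-- def valid_card(num):
--     # Calculates sum according to Luhn's Algorithm
--     sum = 0
--     for i, c in enumerate(reversed(str(num))):
--         if i % 2 == 0:
--             sum += int(c)
--         else:
--             for j in str(int(c) * 2):
--                 sum += int(j)
--
--     # Checks if sum is divisible by 10
--     if sum % 10 == 0:
--         return True
--     else:
--         return False
-- ===== SOURCE B (Python) =====
-- def valid_card(num):
--     # Luhn check: consume reversed digits two at a time; closed form
--     # (d - 9 when doubling overflows) replaces the inner digit-sum loop.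
--     digits = [int(c) for c in reversed(str(num))]
--     total = 0
--     while digits:
--         total += digits[0]
--         if len(digits) > 1:
--             d = 2 * digits[1]
--             total += d - 9 if d > 9 else d
--         digits = digits[2:]
--     return total % 10 == 0
-- ===== Notes on version B (the rewrite author's own statement) =====
-- stated objective: simpler
-- what changed: Replaces the enumerate/index-parity loop with an inner loop over the digits of str(2*d) by a single two-digits-at-a-time pass over the reversed digit list, using a closed-form correction instead of summing the digits of the doubled value.
import Mathlib
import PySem

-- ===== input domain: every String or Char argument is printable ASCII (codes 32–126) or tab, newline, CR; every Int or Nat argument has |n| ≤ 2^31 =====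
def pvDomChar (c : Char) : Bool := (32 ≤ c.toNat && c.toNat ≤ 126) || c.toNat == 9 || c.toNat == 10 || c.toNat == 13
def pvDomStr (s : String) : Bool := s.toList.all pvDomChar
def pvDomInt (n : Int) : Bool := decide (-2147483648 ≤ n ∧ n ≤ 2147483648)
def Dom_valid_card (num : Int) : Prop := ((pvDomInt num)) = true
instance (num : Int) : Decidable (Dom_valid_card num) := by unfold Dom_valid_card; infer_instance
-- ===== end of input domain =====

-- B replaces A's enumerate-and-parity loop with an inner digit-sum loop by a
-- two-digits-at-a-time pass using a closed-form overflow correction; objective: simpler.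

-- int(c) for a digit character c (Pre_ guarantees only digit characters reach it)
def pyIntChar (c : Char) : Int := (PySem.Int.ofChars? [c]).getD 0

-- ===== PORT A =====
def valid_card (num : Int) : Bool :=
  -- sum = 0; for i, c in enumerate(reversed(str(num))): …
  let sum := (PySem.List.enumerate ((PySem.Int.toChars num).reverse)).foldl
    (fun acc p =>
      if PySem.Int.mod p.1 2 == 0 then
        acc + pyIntChar p.2
      else
        -- for j in str(int(c) * 2): sum += int(j)
        (PySem.Int.toChars (pyIntChar p.2 * 2)).foldl (fun a j => a + pyIntChar j) acc) 0
  PySem.Int.mod sum 10 == 0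

-- ===== PORT B =====
-- the while loop of Source B: consume the digit list two at a time, accumulating total
def luhnSum : List Int → Int → Int
  | [], total => total
  | [a], total => total + a
  | a :: b :: rest, total =>
      luhnSum rest (total + a + (if 2 * b > 9 then 2 * b - 9 else 2 * b))

def valid_card_alt (num : Int) : Bool :=
  let digits := ((PySem.Int.toChars num).reverse).map pyIntChar
  PySem.Int.mod (luhnSum digits 0) 10 == 0

-- ===== PRECONDITION & SPEC =====
-- A raises ValueError on every negative num: reversed(str(num)) ends with '-', and int('-') raises.
def Pre_valid_card (num : Int) : Prop := 0 ≤ num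
instance (num : Int) : Decidable (Pre_valid_card num) := by unfold Pre_valid_card; infer_instance
def pvWitness_valid_card : Int := (4242424242 : Int) % 2147483648

def Spec_valid_card (num : Int) (out : Bool) : Prop := out = valid_card_alt num
instance (num : Int) (out : Bool) : Decidable (Spec_valid_card num out) := by unfold Spec_valid_card; infer_instance

-- ===== CLAIM (what is proved, stated in full; the proofs are below) =====
def Claim_equal_valid_card : Prop := ∀ (num : Int), Dom_valid_card num → Pre_valid_card num → Spec_valid_card num (valid_card num)

-- ===== LEMMAS AND PROOFS =====

-- every character str produces for a nonnegative integer is an ASCII digit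
theorem digitChar_is_digit (m : Nat) (h : m < 10) :
    48 ≤ (Nat.digitChar m).toNat ∧ (Nat.digitChar m).toNat ≤ 57 := by
  interval_cases m <;> decide

theorem toDigitsCore_digits (f : Nat) : ∀ (n : Nat) (l : List Char),
    (∀ c ∈ l, 48 ≤ c.toNat ∧ c.toNat ≤ 57) →
    ∀ c ∈ Nat.toDigitsCore 10 f n l, 48 ≤ c.toNat ∧ c.toNat ≤ 57 := by
  induction f with
  | zero => intro n l hl; simpa [Nat.toDigitsCore] using hl
  | succ f ih =>
    intro n l hl
    have hd := digitChar_is_digit (n % 10) (Nat.mod_lt _ (by omega))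
    rw [Nat.toDigitsCore]
    by_cases h0 : n / 10 = 0
    · rw [if_pos h0]
      intro c hc
      rcases List.mem_cons.mp hc with hc | hc
      · simpa [hc] using hd
      · exact hl c hc
    · rw [if_neg h0]
      refine ih (n / 10) _ ?_
      intro c' hc'
      rcases List.mem_cons.mp hc' with hc' | hc'
      · simpa [hc'] using hd
      · exact hl c' hc'

theorem toChars_digits (num : Int) (h : 0 ≤ num) :
    ∀ c ∈ PySem.Int.toChars num, 48 ≤ c.toNat ∧ c.toNat ≤ 57 := by
  have : PySem.Int.toChars num = Nat.toDigits 10 num.toNat := by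
    simp [PySem.Int.toChars, not_lt.mpr h]
  rw [this, Nat.toDigits]
  exact toDigitsCore_digits _ _ [] (by simp)

theorem digit_cases (c : Char) (h1 : 48 ≤ c.toNat) (h2 : c.toNat ≤ 57) :
    c ∈ ['0','1','2','3','4','5','6','7','8','9'] := by
  have h : c.toNat = 48 ∨ c.toNat = 49 ∨ c.toNat = 50 ∨ c.toNat = 51 ∨ c.toNat = 52 ∨
      c.toNat = 53 ∨ c.toNat = 54 ∨ c.toNat = 55 ∨ c.toNat = 56 ∨ c.toNat = 57 := by omega
  simp only [List.mem_cons, List.not_mem_nil, or_false]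
  rcases h with h|h|h|h|h|h|h|h|h|h <;>
    [exact Or.inl (Char.ext (UInt32.toNat_inj.mp h));
     exact Or.inr (Or.inl (Char.ext (UInt32.toNat_inj.mp h)));
     exact Or.inr (Or.inr (Or.inl (Char.ext (UInt32.toNat_inj.mp h))));
     exact Or.inr (Or.inr (Or.inr (Or.inl (Char.ext (UInt32.toNat_inj.mp h)))));
     exact Or.inr (Or.inr (Or.inr (Or.inr (Or.inl (Char.ext (UInt32.toNat_inj.mp h))))));
     exact Or.inr (Or.inr (Or.inr (Or.inr (Or.inr (Or.inl (Char.ext (UInt32.toNat_inj.mp h)))))));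
     exact Or.inr (Or.inr (Or.inr (Or.inr (Or.inr (Or.inr (Or.inl (Char.ext (UInt32.toNat_inj.mp h))))))));
     exact Or.inr (Or.inr (Or.inr (Or.inr (Or.inr (Or.inr (Or.inr (Or.inl (Char.ext (UInt32.toNat_inj.mp h)))))))));
     exact Or.inr (Or.inr (Or.inr (Or.inr (Or.inr (Or.inr (Or.inr (Or.inr (Or.inl (Char.ext (UInt32.toNat_inj.mp h))))))))));
     exact Or.inr (Or.inr (Or.inr (Or.inr (Or.inr (Or.inr (Or.inr (Or.inr (Or.inr (Char.ext (UInt32.toNat_inj.mp h))))))))))]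

-- A's inner digit-sum loop over str(int(c)*2) equals B's closed form, for a digit c
theorem inner_sum_eq (c : Char) (h1 : 48 ≤ c.toNat) (h2 : c.toNat ≤ 57) (acc : Int) :
    (PySem.Int.toChars (pyIntChar c * 2)).foldl (fun a j => a + pyIntChar j) acc
      = acc + (if 2 * pyIntChar c > 9 then 2 * pyIntChar c - 9 else 2 * pyIntChar c) := by
  rw [PySem.List.foldl_add]
  congr 1
  have hmem := digit_cases c h1 h2
  fin_cases hmem <;> decide

theorem mod_two_succ (s : Int) (h : PySem.Int.mod s 2 = 0) : ¬ PySem.Int.mod (s + 1) 2 = 0 := by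
  rw [PySem.Int.mod_eq_emod_of_pos (by norm_num)] at h ⊢
  omega

theorem mod_two_succ_succ (s : Int) (h : PySem.Int.mod s 2 = 0) : PySem.Int.mod (s + 1 + 1) 2 = 0 := by
  rw [PySem.Int.mod_eq_emod_of_pos (by norm_num)] at h ⊢
  omega

-- the Luhn loop of A equals the two-at-a-time loop of B
theorem key : ∀ (l : List Char), (∀ c ∈ l, 48 ≤ c.toNat ∧ c.toNat ≤ 57) →
    ∀ (s acc : Int), PySem.Int.mod s 2 = 0 →
    (PySem.List.enumerate l s).foldl
      (fun acc p =>
        if PySem.Int.mod p.1 2 == 0 then acc + pyIntChar p.2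
        else (PySem.Int.toChars (pyIntChar p.2 * 2)).foldl (fun a j => a + pyIntChar j) acc) acc
      = luhnSum (l.map pyIntChar) acc
  | [], _, s, acc, _ => by simp [PySem.List.enumerate, luhnSum]
  | [a], hd, s, acc, hs => by
      rw [PySem.List.enumerate_cons, PySem.List.enumerate_nil]
      simp only [List.foldl_cons, List.foldl_nil, List.map_cons, List.map_nil, luhnSum]
      rw [if_pos (show (PySem.Int.mod s 2 == 0) = true by simp only [beq_iff_eq]; exact hs)]
  | a :: b :: rest, hd, s, acc, hs => by
      have hb := hd b (by simp)
      rw [PySem.List.enumerate_cons, PySem.List.enumerate_cons]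
      simp only [List.foldl_cons]
      rw [key rest (fun c hc => hd c (by simp [hc])) (s + 1 + 1) _ (mod_two_succ_succ s hs)]
      simp only [List.map_cons, luhnSum]
      congr 1
      have hodd : (PySem.Int.mod (s + 1) 2 == 0) = false := by
        simp only [beq_eq_false_iff_ne, ne_eq]
        exact mod_two_succ s hs
      simp only [hodd, Bool.false_eq_true, if_false]
      rw [inner_sum_eq b hb.1 hb.2]
      rw [if_pos (show (PySem.Int.mod s 2 == 0) = true by simp only [beq_iff_eq]; exact hs)]

-- ===== VERDICT (by name: the statement is the Claim_ definition above) =====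
theorem valid_card_spec : Claim_equal_valid_card := by
  intro num _ hpre
  unfold Spec_valid_card valid_card valid_card_alt
  have hall : ∀ c ∈ (PySem.Int.toChars num).reverse, 48 ≤ c.toNat ∧ c.toNat ≤ 57 := by
    intro c hc
    exact toChars_digits num hpre c (List.mem_reverse.mp hc)
  rw [key _ hall 0 0 (by decide)]
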